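-- pv_equiv track=rewrite | github.com/XiangguanMu/arrow | datasets/lorenz/lorenz_xor.py | boolList2BinString
-- ===== SOURCE A (Python) =====
-- def boolList2BinString(lst):
--     res = 0
--     for i in lst:
--         if i:
--             res = (res << 1) | 1
--         else:
--             res = res << 1
--     return res
-- ===== SOURCE B (Python) =====
-- def boolList2BinString(lst):
--     return int("0" + "".join("1" if x else "0" for x in lst), 2)
-- ===== Notes on version B (the rewrite author's own statement) =====
-- stated objective: idiomatic
-- what changed: B builds the binary digit string and parses it with int(s, 2) instead of maintaining a shifted/or-ed big-int accumulator in an explicit Python loop; the leading '0' makes the empty list yield 0.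
import Mathlib
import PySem

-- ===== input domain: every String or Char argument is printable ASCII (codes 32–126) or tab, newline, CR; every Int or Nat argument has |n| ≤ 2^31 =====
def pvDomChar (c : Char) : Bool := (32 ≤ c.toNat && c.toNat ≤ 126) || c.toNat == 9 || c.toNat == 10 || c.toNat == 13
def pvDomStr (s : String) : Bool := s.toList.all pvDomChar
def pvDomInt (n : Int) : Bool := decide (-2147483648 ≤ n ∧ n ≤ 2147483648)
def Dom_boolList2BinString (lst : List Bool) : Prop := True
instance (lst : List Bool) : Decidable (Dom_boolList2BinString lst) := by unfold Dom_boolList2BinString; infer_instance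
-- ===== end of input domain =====

-- B converts the list to a binary digit string and parses it with int(s, 2) (idiomatic, same cost); return value only.


-- ===== PORT A =====
-- res = 0; for i in lst: res = (res << 1) | 1 if i else res << 1
def boolList2BinString (lst : List Bool) : Int :=
  lst.foldl (fun res i => if i then PySem.Int.bor (res <<< (1 : Nat)) 1 else res <<< (1 : Nat)) 0

-- ===== PORT B =====
-- "1" if x else "0" for each element, with the leading "0"
def pvBitChars (lst : List Bool) : List Char :=
  lst.map (fun x => if x then '1' else '0')

-- int(s, 2): hand-ported base-2 parser over the digit characters; exact for
-- strings consisting only of '0'/'1' characters, which is all B ever builds.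
def pvParseBin (cs : List Char) : Int :=
  cs.foldl (fun acc c => 2 * acc + (if c == '1' then 1 else 0)) 0

def boolList2BinString_alt (lst : List Bool) : Int :=
  pvParseBin ('0' :: pvBitChars lst)

-- ===== PRECONDITION & SPEC =====
def Spec_boolList2BinString (lst : List Bool) (out : Int) : Prop := out = boolList2BinString_alt lst
instance (lst : List Bool) (out : Int) : Decidable (Spec_boolList2BinString lst out) := by unfold Spec_boolList2BinString; infer_instance

-- ===== CLAIM (what is proved, stated in full; the proofs are below) =====
def Claim_equal_boolList2BinString : Prop := ∀ (lst : List Bool), Dom_boolList2BinString lst → Spec_boolList2BinString lst (boolList2BinString lst)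

-- ===== LEMMAS AND PROOFS =====

theorem pv_nat_two_mul_or_one (m : Nat) : (2 * m) ||| 1 = 2 * m + 1 := by
  apply Nat.eq_of_testBit_eq
  intro i
  cases i with
  | zero => simp [Nat.testBit_zero]
  | succ i =>
    rw [Nat.testBit_or, Nat.testBit_succ, Nat.testBit_succ, Nat.testBit_succ]
    have h1 : (2 * m) / 2 = m := by omega
    have h2 : (2 * m + 1) / 2 = m := by omega
    have h3 : (1 : Nat) / 2 = 0 := by omega
    rw [h1, h2, h3]
    simp

theorem pv_shl_one (r : Int) : r <<< (1 : Nat) = 2 * r := by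
  rw [Int.shiftLeft_eq]; ring

theorem pv_bor_step (r : Int) (h : 0 ≤ r) :
    PySem.Int.bor (r <<< (1 : Nat)) 1 = 2 * r + 1 := by
  unfold PySem.Int.bor
  rw [pv_shl_one]
  rw [if_pos (by omega), if_pos (by norm_num)]
  have ht : (2 * r).toNat = 2 * r.toNat := by omega
  simp only [Int.toNat_one]
  rw [ht, pv_nat_two_mul_or_one]
  push_cast [Int.toNat_of_nonneg h]
  ring

-- loop invariant: A's shifted/or-ed fold from any nonnegative accumulator
-- equals B's base-2 digit fold from the same accumulator
theorem pv_fold_agree (lst : List Bool) (r : Int) (h : 0 ≤ r) :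
    lst.foldl (fun res i => if i then PySem.Int.bor (res <<< (1 : Nat)) 1 else res <<< (1 : Nat)) r
      = (pvBitChars lst).foldl (fun acc c => 2 * acc + (if c == '1' then 1 else 0)) r := by
  induction lst generalizing r with
  | nil => rfl
  | cons b tl ih =>
    cases b with
    | true =>
      simp only [List.foldl, pvBitChars, List.map]
      simp
      rw [pv_bor_step r h]
      have := ih (2 * r + 1) (by omega)
      simpa [pvBitChars] using this
    | false =>
      simp only [List.foldl, pvBitChars, List.map]
      simp
      rw [pv_shl_one]
      have := ih (2 * r) (by omega)
      simpa [pvBitChars] using this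

-- ===== VERDICT (by name: the statement is the Claim_ definition above) =====
theorem boolList2BinString_spec : Claim_equal_boolList2BinString := by
  intro lst _
  unfold Spec_boolList2BinString boolList2BinString boolList2BinString_alt pvParseBin
  simp only [List.foldl]
  have h0 : (2 * (0 : Int) + (if ('0' == '1') then 1 else 0)) = 0 := by decide
  rw [h0]
  exact pv_fold_agree lst 0 (by norm_num)
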